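-- pv_equiv track=rewrite | github.com/marcelgiglio/valor_extenso | valor_extenso.py | splitNumberOnPotency
-- ===== SOURCE A (Python) =====
-- def splitNumberOnPotency(stg):
-- 	#slpit number on parts of 3 digit inversed
-- 	new=[]
-- 	num = 3
-- 	for start in (range(len(stg), 0, -num)):
--   		if (start-num<0):
--   			new.append(stg[0:start])
--   		else:
--   			new.append(stg[start-num:start])
-- 	return new
-- ===== SOURCE B (Python) =====
-- def splitNumberOnPotency(stg):
--     # single right-to-left character pass: grow a 3-char buffer, flush each full buffer
--     new = []
--     buf = ''
--     for ch in reversed(stg):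
--         buf = ch + buf
--         if len(buf) == 3:
--             new.append(buf)
--             buf = ''
--     if buf:
--         new.append(buf)
--     return new
-- ===== Notes on version B (the rewrite author's own statement) =====
-- stated objective: alternative
-- what changed: Replaces A's backwards index loop with absolute-index slicing (range(len,0,-3) plus a start-num<0 boundary case) by a single right-to-left character pass that grows a 3-char buffer and flushes it whenever full, with no index arithmetic or slicing at all.
import Mathlib
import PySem

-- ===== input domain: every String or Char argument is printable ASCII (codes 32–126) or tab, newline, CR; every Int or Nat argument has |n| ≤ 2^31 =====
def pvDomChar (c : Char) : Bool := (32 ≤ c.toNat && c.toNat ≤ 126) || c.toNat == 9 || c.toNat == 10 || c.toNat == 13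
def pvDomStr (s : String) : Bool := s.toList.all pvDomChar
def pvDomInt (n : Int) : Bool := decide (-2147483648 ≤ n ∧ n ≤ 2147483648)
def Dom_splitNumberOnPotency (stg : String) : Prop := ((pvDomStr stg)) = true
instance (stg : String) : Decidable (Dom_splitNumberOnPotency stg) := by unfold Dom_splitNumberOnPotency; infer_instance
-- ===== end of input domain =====

-- B replaces A's backwards index/slice loop by a single right-to-left character pass
-- with a 3-char buffer (alternative decomposition, same cost; return value only).


-- ===== PORT A =====
-- for start in range(len(stg), 0, -3): append stg[0:start] if start-3 < 0 else
-- stg[start-3:start]  (num = 3 written inline)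
def splitNumberOnPotency (stg : String) : List String :=
  (PySem.List.pyRange (PySem.Str.len stg) 0 (-3)).foldl
    (fun new start =>
      if start - 3 < 0 then new ++ [PySem.Str.slice stg (some 0) (some start)]
      else new ++ [PySem.Str.slice stg (some (start - 3)) (some start)])
    []

-- ===== PORT B =====
-- one step of B's loop body: buf = ch + buf; flush when it reaches 3 chars
def pvAltStep (st : List String × List Char) (ch : Char) : List String × List Char :=
  let buf' := ch :: st.2
  if buf'.length = 3 then (st.1 ++ [String.ofList buf'], []) else (st.1, buf')

-- for ch in reversed(stg): …  then append the leftover buffer if nonempty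
def splitNumberOnPotency_alt (stg : String) : List String :=
  let st := stg.toList.reverse.foldl pvAltStep ([], [])
  if st.2 = [] then st.1 else st.1 ++ [String.ofList st.2]

-- ===== PRECONDITION & SPEC =====
def Spec_splitNumberOnPotency (stg : String) (out : List String) : Prop := out = splitNumberOnPotency_alt stg
instance (stg : String) (out : List String) : Decidable (Spec_splitNumberOnPotency stg out) := by unfold Spec_splitNumberOnPotency; infer_instance

-- ===== CLAIM (what is proved, stated in full; the proofs are below) =====
def Claim_equal_splitNumberOnPotency : Prop := ∀ (stg : String), Dom_splitNumberOnPotency stg → Spec_splitNumberOnPotency stg (splitNumberOnPotency stg)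

-- ===== LEMMAS AND PROOFS =====

-- reference chunking: peel the last ≤3 characters, recurse on the rest
def pvChunks3 (l : List Char) : List String :=
  if h : l = [] then []
  else String.ofList (l.drop (l.length - 3)) :: pvChunks3 (l.take (l.length - 3))
termination_by l.length
decreasing_by
  have : 0 < l.length := List.length_pos_of_ne_nil h
  simp
  omega

lemma pvChunks3_nil : pvChunks3 [] = [] := by
  unfold pvChunks3
  rfl

lemma pvChunks3_cons (l : List Char) (h : l ≠ []) :
    pvChunks3 l = String.ofList (l.drop (l.length - 3)) :: pvChunks3 (l.take (l.length - 3)) := by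
  rw [pvChunks3]
  rw [dif_neg h]

lemma pvChunks3_short (l : List Char) (h1 : l ≠ []) (h2 : l.length < 3) :
    pvChunks3 l = [String.ofList l] := by
  rw [pvChunks3_cons l h1]
  have h0 : l.length - 3 = 0 := by omega
  simp [h0, pvChunks3_nil]

lemma pvChunks3_append3 (xs c3 : List Char) (h : c3.length = 3) :
    pvChunks3 (xs ++ c3) = String.ofList c3 :: pvChunks3 xs := by
  have hne : xs ++ c3 ≠ [] := by
    intro hq
    have := congrArg List.length hq
    simp [h] at this
  rw [pvChunks3_cons (xs ++ c3) hne]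
  have hl : (xs ++ c3).length - 3 = xs.length := by simp [h]
  rw [hl]
  simp

-- cons/nil unfolding of range(n, 0, -3) (the library lemmas cover only steps ±1)
lemma pyRange_neg3_nil (n : Int) (h : n ≤ 0) : PySem.List.pyRange n 0 (-3) = [] := by
  simp only [PySem.List.pyRange]
  norm_num
  intro
  omega

lemma pyRange_neg3_cons (n : Int) (h : 0 < n) :
    PySem.List.pyRange n 0 (-3) = n :: PySem.List.pyRange (n - 3) 0 (-3) := by
  simp only [PySem.List.pyRange]
  norm_num [h]
  have hcount : (if 3 < n then ((n - 1) / 3).toNat else 0) = ((n + 3 - 1) / 3).toNat - 1 := by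
    split <;> omega
  have hc1 : ((n + 3 - 1) / 3).toNat = (((n + 3 - 1) / 3).toNat - 1) + 1 := by omega
  rw [hcount]
  conv_lhs => rw [hc1]
  rw [List.range_succ_eq_map, List.map_cons, List.map_map]
  congr 1
  · norm_num
  · apply List.map_congr_left
    intro k _
    simp only [Function.comp_apply]
    push_cast
    ring

lemma mem_pyRange_neg3 {n x : Int} (hx : x ∈ PySem.List.pyRange n 0 (-3)) : 0 < x ∧ x ≤ n := by
  simp only [PySem.List.pyRange] at hx
  norm_num at hx
  by_cases h : (0 : Int) < n
  · simp only [if_pos h] at hx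
    obtain ⟨k, hk, hkx⟩ := hx
    omega
  · simp only [if_neg h] at hx
    simp at hx

-- A's per-index slice, as a function of the underlying character list
def pvAslice (l : List Char) (start : Int) : String :=
  if start - 3 < 0 then String.ofList (PySem.List.slice l (some 0) (some start))
  else String.ofList (PySem.List.slice l (some (start - 3)) (some start))

-- A's loop computes pvChunks3 (strong induction on the length, three characters at a time)
lemma A_eq_chunks (l : List Char) :
    (PySem.List.pyRange (l.length : Int) 0 (-3)).map (pvAslice l) = pvChunks3 l := by
  induction hn : l.length using Nat.strong_induction_on generalizing l with
  | _ n ih =>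
  rcases Nat.eq_zero_or_pos n with h0 | hpos
  · subst h0
    have hl : l = [] := List.eq_nil_of_length_eq_zero hn
    subst hl
    simp [pyRange_neg3_nil 0 le_rfl, pvChunks3_nil]
  · have hl : l ≠ [] := by
      intro h; subst h; simp at hn; omega
    rw [pyRange_neg3_cons (n : Int) (by exact_mod_cast hpos), List.map_cons,
        pvChunks3_cons l hl]
    have hhead : pvAslice l (n : Int) = String.ofList (l.drop (l.length - 3)) := by
      unfold pvAslice
      by_cases h3 : (n : Int) - 3 < 0
      · rw [if_pos h3, PySem.List.slice_toNat l le_rfl (by positivity)]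
        have hd : l.length - 3 = 0 := by omega
        simp only [hd, List.drop_zero, Int.toNat_zero, Nat.sub_zero, Int.toNat_natCast]
        congr 1
        apply List.take_of_length_le
        omega
      · rw [if_neg h3, PySem.List.slice_toNat l (by omega) (by omega)]
        have ha : ((n : Int) - 3).toNat = n - 3 := by omega
        have hb : (n : Int).toNat = n := by omega
        rw [ha, hb, hn]
        congr 1
        apply List.take_of_length_le
        simp [hn]
    rw [hhead]
    congr 1
    -- tail: the remaining range slices only the first n-3 characters
    by_cases h4 : n ≤ 3
    · rw [pyRange_neg3_nil _ (by omega)]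
      have ht : l.length - 3 = 0 := by omega
      rw [ht]
      simp [pvChunks3_nil]
    · have hlen' : (l.take (l.length - 3)).length = n - 3 := by
        simp [hn]
      have hcast2 : (((l.take (l.length - 3)).length : Nat) : Int) = (n : Int) - 3 := by
        rw [hlen']; omega
      have ihr := ih (n - 3) (by omega) (l.take (l.length - 3)) hlen'
      rw [← ihr, show (((n - 3 : Nat)) : Int) = (n : Int) - 3 by omega]
      apply List.map_congr_left
      intro start hstart
      obtain ⟨hs0, hsn⟩ := mem_pyRange_neg3 hstart
      unfold pvAslice
      by_cases h5 : start - 3 < 0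
      · rw [if_pos h5, if_pos h5,
            PySem.List.slice_toNat _ le_rfl (by omega), PySem.List.slice_toNat _ le_rfl (by omega)]
        congr 1
        simp only [List.drop_zero, Int.toNat_zero, Nat.sub_zero, List.take_take]
        congr 1
        simp [hn]
        omega
      · rw [if_neg h5, if_neg h5,
            PySem.List.slice_toNat _ (by omega) (by omega),
            PySem.List.slice_toNat _ (by omega) (by omega)]
        congr 1
        rw [List.drop_take, List.take_take]
        congr 1
        simp [hn]
        omega

-- B's loop invariant: processing rl with buffer buf appends the chunks of rl.reverse ++ buf
lemma B_inv (rl : List Char) (buf : List Char) (new : List String) (hb : buf.length < 3) :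
    (let st := rl.foldl pvAltStep (new, buf)
     if st.2 = [] then st.1 else st.1 ++ [String.ofList st.2])
      = new ++ pvChunks3 (rl.reverse ++ buf) := by
  induction rl generalizing new buf with
  | nil =>
    simp only [List.foldl_nil, List.reverse_nil, List.nil_append]
    by_cases h : buf = []
    · simp [h, pvChunks3_nil]
    · rw [if_neg h, pvChunks3_short buf h hb]
  | cons ch rest ihr =>
    simp only [List.foldl_cons, List.reverse_cons, List.append_assoc, List.singleton_append]
    by_cases h3 : (ch :: buf).length = 3
    · have hx : buf.length + 1 = 3 := by simpa using h3
      have hstep : pvAltStep (new, buf) ch = (new ++ [String.ofList (ch :: buf)], []) := by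
        simp [pvAltStep, hx]
      rw [hstep, ihr [] (new ++ [String.ofList (ch :: buf)]) (by simp),
          List.append_nil, pvChunks3_append3 rest.reverse (ch :: buf) h3]
      simp
    · have hx : ¬ buf.length + 1 = 3 := by simpa using h3
      have hstep : pvAltStep (new, buf) ch = (new, ch :: buf) := by
        simp [pvAltStep, hx]
      rw [hstep, ihr (ch :: buf) new (by simp; omega)]

-- ===== VERDICT (by name: the statement is the Claim_ definition above) =====
theorem splitNumberOnPotency_spec : Claim_equal_splitNumberOnPotency := by
  intro stg _
  unfold Spec_splitNumberOnPotency splitNumberOnPotency splitNumberOnPotency_alt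
  have hB := B_inv stg.toList.reverse [] [] (by simp)
  rw [List.reverse_reverse, List.append_nil, List.nil_append] at hB
  have hfun : (fun (new : List String) (start : Int) =>
      if start - 3 < 0 then new ++ [PySem.Str.slice stg (some 0) (some start)]
      else new ++ [PySem.Str.slice stg (some (start - 3)) (some start)])
      = fun new start => new ++ [pvAslice stg.toList start] := by
    funext new start
    unfold pvAslice
    split <;> rfl
  rw [PySem.Str.len_eq, hfun, PySem.List.foldl_append_singleton_eq_map, List.nil_append,
      A_eq_chunks stg.toList]
  exact hB.symm
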